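-- pv_equiv track=rewrite | github.com/liver0377/mini_cc | src/mini_cc/tui/widgets/completion_popup.py | _fuzzy_match_files
-- ===== SOURCE A (Python) =====
-- _MAX_FILE_RESULTS = 20
--
-- def _fuzzy_match_files(files: list[str], query: str, limit: int = _MAX_FILE_RESULTS) -> list[str]:
--     if not query:
--         return files[:limit]
--
--     q_lower = query.lower()
--     segments = [s for s in q_lower.split("/") if s]
--
--     scored: list[tuple[int, str]] = []
--     for f in files:
--         f_lower = f.lower()
--         if q_lower in f_lower:
--             idx = f_lower.index(q_lower)
--             score = 1000 - idx
--             scored.append((score, f))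
--             continue
--
--         if _segment_match(f_lower, segments):
--             last_idx = _last_segment_index(f_lower, segments)
--             scored.append((500 - last_idx, f))
--
--     scored.sort(key=lambda x: (-x[0], x[1]))
--     return [f for _, f in scored[:limit]]
--
-- def _segment_match(path_lower: str, segments: list[str]) -> bool:
--     pos = 0
--     for seg in segments:
--         idx = path_lower.find(seg, pos)
--         if idx == -1:
--             return False
--         pos = idx + len(seg)
--     return True
--
-- def _last_segment_index(path_lower: str, segments: list[str]) -> int:
--     pos = 0
--     for seg in segments:
--         idx = path_lower.find(seg, pos)
--         if idx == -1:
--             return 9999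
--         pos = idx + len(seg)
--     return pos
-- ===== SOURCE B (Python) =====
-- _MAX_FILE_RESULTS = 20
--
-- def _fuzzy_match_files(files: list[str], query: str, limit: int = _MAX_FILE_RESULTS) -> list[str]:
--     if not query:
--         return files[:limit]
--     q_lower = query.lower()
--     segments = [s for s in q_lower.split("/") if s]
--     # online ranking: 'ranked' is kept ordered by (score desc, path asc) at all
--     # times; each matching file is inserted at its place, no sort call at the end
--     ranked: list[tuple[int, str]] = []
--     for f in files:
--         score = _score(f.lower(), q_lower, segments)
--         if score is not None:
--             _insort(ranked, score, f)
--     return [f for _, f in ranked[:limit]]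
--
-- def _score(f_lower: str, q_lower: str, segments: list[str]):
--     # one scan: direct substring hit, else a single walk over the segments
--     i = f_lower.find(q_lower)
--     if i != -1:
--         return 1000 - i
--     pos = 0
--     for seg in segments:
--         j = f_lower.find(seg, pos)
--         if j == -1:
--             return None
--         pos = j + len(seg)
--     return 500 - pos
--
-- def _insort(ranked: list, score: int, f: str) -> None:
--     # insert before the first entry it outranks; ties go after equal entries (stable)
--     k = 0
--     while k < len(ranked) and not _outranks(score, f, ranked[k]):
--         k += 1
--     ranked.insert(k, (score, f))
--
-- def _outranks(score: int, f: str, entry: tuple) -> bool: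
--     s2, f2 = entry
--     return score > s2 or (not s2 > score and f < f2)
-- ===== Notes on version B (the rewrite author's own statement) =====
-- stated objective: alternative
-- what changed: Replaces collect-then-sort (append all scored pairs, then scored.sort(key=(-score, path)) and slice) with an online insertion ranking: a single fused scorer per file (no _segment_match/_last_segment_index double walk, no in+index double substring search) and each hit is inserted at its rank position in an always-ordered list, so no sort call and no unsorted intermediate list exist.
import Mathlib
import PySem

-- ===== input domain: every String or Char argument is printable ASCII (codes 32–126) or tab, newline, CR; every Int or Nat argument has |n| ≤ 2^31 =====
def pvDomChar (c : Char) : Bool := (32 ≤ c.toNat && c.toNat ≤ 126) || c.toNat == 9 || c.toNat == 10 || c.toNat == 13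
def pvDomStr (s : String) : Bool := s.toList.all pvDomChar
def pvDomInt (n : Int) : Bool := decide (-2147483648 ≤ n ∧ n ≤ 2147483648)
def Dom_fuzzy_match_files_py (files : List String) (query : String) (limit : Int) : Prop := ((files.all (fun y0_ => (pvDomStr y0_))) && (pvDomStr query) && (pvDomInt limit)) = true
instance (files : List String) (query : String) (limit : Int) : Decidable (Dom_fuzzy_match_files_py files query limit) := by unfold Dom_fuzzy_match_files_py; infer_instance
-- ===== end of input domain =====

-- B replaces A's collect-then-sort (build unsorted scored list, sort by (-score, path), slice)
-- with an online insertion ranking fed by one fused per-file scoring scan; objective: alternative.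

-- ===== PORT A =====
-- _segment_match: loop over segments with pos, early return False on a miss (Option state: none = returned False)
def fmf_segment_match (path_lower : String) (segments : List String) : Bool :=
  (segments.foldl
    (fun st seg =>
      match st with
      | none => none
      | some pos =>
        let idx := PySem.Str.findFrom path_lower seg pos
        if idx = -1 then none else some (idx + (PySem.Str.len seg : Int)))
    (some (0 : Int))).isSome

-- _last_segment_index: the same loop, early return 9999 on a miss, else the final pos
def fmf_last_segment_index (path_lower : String) (segments : List String) : Int :=
  match segments.foldl
    (fun st seg =>
      match st with
      | none => none
      | some pos =>
        let idx := PySem.Str.findFrom path_lower seg pos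
        if idx = -1 then none else some (idx + (PySem.Str.len seg : Int)))
    (some (0 : Int)) with
  | none => 9999
  | some pos => pos

def fuzzy_match_files_py (files : List String) (query : String) (limit : Int) : List String :=
  if query = "" then PySem.List.slice files none (some limit)
  else
    let q_lower := PySem.Str.lower query
    let segments := ((PySem.Str.split? q_lower "/").getD []).filter (fun s => s ≠ "")
    let scored := files.foldl
      (fun acc f =>
        let f_lower := PySem.Str.lower f
        if PySem.Str.isIn q_lower f_lower then
          -- f_lower.index(q_lower) is guarded by 'in', so it equals find (no ValueError)
          let idx := PySem.Str.find f_lower q_lower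
          acc ++ [((1000 : Int) - idx, f)]
        else if fmf_segment_match f_lower segments then
          acc ++ [((500 : Int) - fmf_last_segment_index f_lower segments, f)]
        else acc)
      ([] : List (Int × String))
    let sortedScored := PySem.List.sorted2 scored (fun x => -x.1) (fun x => x.2)
    (PySem.List.slice sortedScored none (some limit)).map (fun p => p.2)

-- ===== PORT B =====
-- _score: one scan — substring hit, else a single walk over the segments; none = no match
-- (the walk's for-loop with its early 'return None' is the same Option-state fold shape as above)
def fmf_score (f_lower : String) (q_lower : String) (segments : List String) : Option Int :=
  let i := PySem.Str.find f_lower q_lower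
  if i ≠ -1 then some (1000 - i)
  else
    match segments.foldl
      (fun st seg =>
        match st with
        | none => none
        | some pos =>
          let idx := PySem.Str.findFrom f_lower seg pos
          if idx = -1 then none else some (idx + (PySem.Str.len seg : Int)))
      (some (0 : Int)) with
    | none => none
    | some pos => some (500 - pos)

-- _outranks: (score, f) goes before entry iff higher score, or equal score and smaller path
def fmf_outranks (score : Int) (f : String) (entry : Int × String) : Bool :=
  decide (score > entry.1) || (!decide (entry.1 > score) && decide (f < entry.2))

-- _insort: walk past every entry not outranked, insert there (while-loop as structural recursion)
def fmf_insort (score : Int) (f : String) : List (Int × String) → List (Int × String)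
  | [] => [(score, f)]
  | y :: ys =>
    if fmf_outranks score f y then (score, f) :: y :: ys
    else y :: fmf_insort score f ys

def fuzzy_match_files_py_alt (files : List String) (query : String) (limit : Int) : List String :=
  if query = "" then PySem.List.slice files none (some limit)
  else
    let q_lower := PySem.Str.lower query
    let segments := ((PySem.Str.split? q_lower "/").getD []).filter (fun s => s ≠ "")
    let ranked := files.foldl
      (fun ranked f =>
        match fmf_score (PySem.Str.lower f) q_lower segments with
        | some score => fmf_insort score f ranked
        | none => ranked)
      ([] : List (Int × String))
    (PySem.List.slice ranked none (some limit)).map (fun p => p.2)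

-- ===== PRECONDITION & SPEC =====
def Spec_fuzzy_match_files_py (files : List String) (query : String) (limit : Int) (out : List String) : Prop := out = fuzzy_match_files_py_alt files query limit
instance (files : List String) (query : String) (limit : Int) (out : List String) : Decidable (Spec_fuzzy_match_files_py files query limit out) := by unfold Spec_fuzzy_match_files_py; infer_instance

-- ===== CLAIM (what is proved, stated in full; the proofs are below) =====
def Claim_equal_fuzzy_match_files_py : Prop := ∀ (files : List String) (query : String) (limit : Int), Dom_fuzzy_match_files_py files query limit → Spec_fuzzy_match_files_py files query limit (fuzzy_match_files_py files query limit)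

-- ===== LEMMAS AND PROOFS =====

-- B's hand-written insertion is insertBy with sorted2's lexicographic (-score, path) comparator
lemma fmf_insort_eq_insertBy (score : Int) (f : String) (ys : List (Int × String)) :
    fmf_insort score f ys
    = PySem.List.insertBy
        (fun a b : Int × String =>
          decide (-a.1 < -b.1) || (!decide (-b.1 < -a.1) && decide (a.2 < b.2)))
        (score, f) ys := by
  induction ys with
  | nil => rfl
  | cons y ys ih =>
    simp only [fmf_insort, PySem.List.insertBy, fmf_outranks, ih]
    have h1 : decide (score > y.1) = decide (-score < -y.1) := by
      simp only [decide_eq_decide]; omega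
    have h2 : decide (y.1 > score) = decide (-y.1 < -score) := by
      simp only [decide_eq_decide]; omega
    rw [h1, h2]

-- the per-file score of B agrees with A's branch chain, as a 0/1-element contribution list
def fmf_contrib (q_lower : String) (segs : List String) (f : String) : List (Int × String) :=
  match fmf_score (PySem.Str.lower f) q_lower segs with
  | some score => [(score, f)]
  | none => []

lemma fmf_step_eq (q_lower : String) (segs : List String) (f : String)
    (acc : List (Int × String)) :
    (let f_lower := PySem.Str.lower f
     if PySem.Str.isIn q_lower f_lower then
       let idx := PySem.Str.find f_lower q_lower
       acc ++ [((1000 : Int) - idx, f)]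
     else if fmf_segment_match f_lower segs then
       acc ++ [((500 : Int) - fmf_last_segment_index f_lower segs, f)]
     else acc)
    = acc ++ fmf_contrib q_lower segs f := by
  unfold fmf_contrib fmf_score fmf_segment_match fmf_last_segment_index
  by_cases hf : PySem.Str.find (PySem.Str.lower f) q_lower = -1
  · have hin : PySem.Str.isIn q_lower (PySem.Str.lower f) = false := by
      rw [Bool.eq_false_iff]
      intro h
      exact (PySem.Str.find_ne_neg_one_iff _ _).mpr ((PySem.Str.isIn_iff_infix _ _).mp h) hf
    cases hfold : (segs.foldl
      (fun st seg =>
        match st with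
        | none => none
        | some pos =>
          let idx := PySem.Str.findFrom (PySem.Str.lower f) seg pos
          if idx = -1 then none else some (idx + (PySem.Str.len seg : Int)))
      (some (0 : Int))) with
    | none => simp only [hin, hf, hfold]; simp
    | some pos => simp only [hin, hf, hfold]; simp
  · have hin : PySem.Str.isIn q_lower (PySem.Str.lower f) = true :=
      (PySem.Str.isIn_iff_infix _ _).mpr ((PySem.Str.find_ne_neg_one_iff _ _).mp hf)
    simp only [hin, ne_eq, hf, not_false_eq_true, if_pos]

-- folding "score then maybe-insert" over files = inserting each file's contribution in order
lemma fmf_onepass_eq (q_lower : String) (segs : List String)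
    (ins : List (Int × String) → Int × String → List (Int × String)) (files : List String)
    (acc : List (Int × String)) :
    files.foldl
      (fun ranked f =>
        match fmf_score (PySem.Str.lower f) q_lower segs with
        | some score => ins ranked (score, f)
        | none => ranked)
      acc
    = (files.flatMap (fmf_contrib q_lower segs)).foldl ins acc := by
  induction files generalizing acc with
  | nil => rfl
  | cons f fs ih =>
    simp only [List.foldl_cons, List.flatMap_cons, List.foldl_append]
    have hstep : (match fmf_score (PySem.Str.lower f) q_lower segs with
        | some score => ins acc (score, f)
        | none => acc)
      = (fmf_contrib q_lower segs f).foldl ins acc := by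
      unfold fmf_contrib
      cases fmf_score (PySem.Str.lower f) q_lower segs <;> rfl
    rw [hstep, ih]

-- ===== VERDICT (by name: the statement is the Claim_ definition above) =====
theorem fuzzy_match_files_py_spec : Claim_equal_fuzzy_match_files_py := by
  intro files query limit _
  unfold Spec_fuzzy_match_files_py fuzzy_match_files_py fuzzy_match_files_py_alt
  by_cases hq : query = ""
  · simp [hq]
  · simp only [hq, if_false]
    have hAloop : files.foldl
        (fun acc f =>
          let f_lower := PySem.Str.lower f
          if PySem.Str.isIn (PySem.Str.lower query) f_lower then
            let idx := PySem.Str.find f_lower (PySem.Str.lower query)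
            acc ++ [((1000 : Int) - idx, f)]
          else if fmf_segment_match f_lower (((PySem.Str.split? (PySem.Str.lower query) "/").getD []).filter (fun s => s ≠ "")) then
            acc ++ [((500 : Int) - fmf_last_segment_index f_lower (((PySem.Str.split? (PySem.Str.lower query) "/").getD []).filter (fun s => s ≠ "")), f)]
          else acc)
        ([] : List (Int × String))
      = files.flatMap (fmf_contrib (PySem.Str.lower query) (((PySem.Str.split? (PySem.Str.lower query) "/").getD []).filter (fun s => s ≠ ""))) := by
      have h1 : files.foldl
          (fun acc f =>
            let f_lower := PySem.Str.lower f
            if PySem.Str.isIn (PySem.Str.lower query) f_lower then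
              let idx := PySem.Str.find f_lower (PySem.Str.lower query)
              acc ++ [((1000 : Int) - idx, f)]
            else if fmf_segment_match f_lower (((PySem.Str.split? (PySem.Str.lower query) "/").getD []).filter (fun s => s ≠ "")) then
              acc ++ [((500 : Int) - fmf_last_segment_index f_lower (((PySem.Str.split? (PySem.Str.lower query) "/").getD []).filter (fun s => s ≠ "")), f)]
            else acc)
          ([] : List (Int × String))
        = files.foldl
          (fun acc f => acc ++ fmf_contrib (PySem.Str.lower query) (((PySem.Str.split? (PySem.Str.lower query) "/").getD []).filter (fun s => s ≠ "")) f)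
          ([] : List (Int × String)) := by
        apply PySem.List.foldl_congr_mem
        intro acc f _
        exact fmf_step_eq (PySem.Str.lower query) _ f acc
      rw [h1, PySem.List.foldl_append_eq_flatMap, List.nil_append]
    have hBloop : files.foldl
        (fun ranked f =>
          match fmf_score (PySem.Str.lower f) (PySem.Str.lower query) (((PySem.Str.split? (PySem.Str.lower query) "/").getD []).filter (fun s => s ≠ "")) with
          | some score => fmf_insort score f ranked
          | none => ranked)
        ([] : List (Int × String))
      = (files.flatMap (fmf_contrib (PySem.Str.lower query) (((PySem.Str.split? (PySem.Str.lower query) "/").getD []).filter (fun s => s ≠ "")))).foldl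
          (fun r x => PySem.List.insertBy
            (fun a b : Int × String =>
              decide (-a.1 < -b.1) || (!decide (-b.1 < -a.1) && decide (a.2 < b.2))) x r)
          ([] : List (Int × String)) := by
      rw [← fmf_onepass_eq]
      apply PySem.List.foldl_congr_mem
      intro acc f _
      cases fmf_score (PySem.Str.lower f) (PySem.Str.lower query) (((PySem.Str.split? (PySem.Str.lower query) "/").getD []).filter (fun s => s ≠ "")) with
      | none => rfl
      | some s => exact fmf_insort_eq_insertBy s f acc
    simp only [hAloop, hBloop, PySem.List.sorted2]
    simp
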